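-- pv_equiv track=rewrite | github.com/yuvraj-verma01/Archival-Data-Digitization-Madras | .venv/Lib/site-packages/paddlex/inference/pipelines/pp_doctranslation/utils.py | _find_split_pos
-- ===== SOURCE A (Python) =====
-- def _is_sentence_dot(text, i):
--     """
--     Check if the given character is a sentence ending punctuation.
--     """
--     # if the character is not a period, return False
--     if text[i] != ".":
--         return False
--     # previous character
--     prev = text[i - 1] if i > 0 else ""
--     # next character
--     next = text[i + 1] if i + 1 < len(text) else ""
--     # previous is digit or letter, then not sentence ending punctuation
--     if prev.isdigit() or prev.isalpha():
--         return False
--     # next is digit or letter, then not sentence ending punctuation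
--     if next.isdigit() or next.isalpha():
--         return False
--     # next is a punctuation, then sentence ending punctuation
--     if next in ("", " ", "\t", "\n", '"', "'", "”", "’", ")", "】", "」", "》"):
--         return True
--     return False
--
-- def _find_split_pos(text, chunk_size):
--     """
--     Find the position to split the text into two chunks.
--
--     Args:
--         text (str): The original text to be split.
--         chunk_size (int): The maximum size of each chunk.
--
--     Returns:
--         int: The index where the text should be split.
--     """
--     center = len(text) // 2
--     split_chars = ["\n", "。", ";", "；", "!", "！", "?", "？"]
--
--     # Search forward
--     for i in range(center, len(text)):
--         if text[i] in split_chars: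
--             # Check for whitespace around the split character
--             j = i + 1
--             while j < len(text) and text[j] in " \t\n":
--                 j += 1
--             if j < len(text) and len(text[:j]) <= chunk_size:
--                 return i, j
--         elif text[i] == "." and _is_sentence_dot(text, i):
--             j = i + 1
--             while j < len(text) and text[j] in " \t\n":
--                 j += 1
--             if j < len(text) and len(text[:j]) <= chunk_size:
--                 return i, j
--
--     # Search backward
--     for i in range(center, 0, -1):
--         if text[i] in split_chars:
--             j = i + 1
--             while j < len(text) and text[j] in " \t\n":
--                 j += 1
--             if len(text[:j]) <= chunk_size:
--                 return i, j
--         elif text[i] == "." and _is_sentence_dot(text, i):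
--             j = i + 1
--             while j < len(text) and text[j] in " \t\n":
--                 j += 1
--             if len(text[:j]) <= chunk_size:
--                 return i, j
--
--     # If no suitable position is found, split directly
--     return min(chunk_size, len(text)), min(chunk_size, len(text))
-- ===== SOURCE B (Python) =====
-- def _find_split_pos(text, chunk_size):
--     n = len(text)
--     center = n // 2
--     stops = "\n\u3002;\uff1b!\uff01?\uff1f"
--     closers = ("", " ", "\t", "\n", '"', "'", "\u201d", "\u2019", ")", "\u3011", "\u300d", "\u300b")
--     first_fwd = None   # first qualifying boundary with i >= center
--     last_bwd = None    # last qualifying boundary with 1 <= i <= center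
--     for i in range(n):
--         c = text[i]
--         if c in stops:
--             pass
--         elif c == ".":
--             prev = text[i - 1] if i > 0 else ""
--             nxt = text[i + 1] if i + 1 < n else ""
--             if (prev.isdigit() or prev.isalpha()
--                     or nxt.isdigit() or nxt.isalpha()
--                     or nxt not in closers):
--                 continue
--         else:
--             continue
--         j = i + 1
--         while j < n and text[j] in " \t\n":
--             j += 1
--         if j > chunk_size:
--             continue
--         if i >= center and first_fwd is None and j < n:
--             first_fwd = (i, j)
--         if 1 <= i <= center:
--             last_bwd = (i, j)
--     if first_fwd is not None:
--         return first_fwd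
--     if last_bwd is not None:
--         return last_bwd
--     m = min(chunk_size, n)
--     return m, m
-- ===== Notes on version B (the rewrite author's own statement) =====
-- stated objective: alternative
-- what changed: B replaces A's two staged scans (forward from the center with early return, then a backward re-scan) by a single left-to-right pass over the whole text that carries two accumulators - the first qualifying boundary at or after the center and the last qualifying boundary in [1, center] - and decides between them only after the pass; the chunk comparison uses j directly instead of building the slice len(text[:j]).
import Mathlib
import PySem

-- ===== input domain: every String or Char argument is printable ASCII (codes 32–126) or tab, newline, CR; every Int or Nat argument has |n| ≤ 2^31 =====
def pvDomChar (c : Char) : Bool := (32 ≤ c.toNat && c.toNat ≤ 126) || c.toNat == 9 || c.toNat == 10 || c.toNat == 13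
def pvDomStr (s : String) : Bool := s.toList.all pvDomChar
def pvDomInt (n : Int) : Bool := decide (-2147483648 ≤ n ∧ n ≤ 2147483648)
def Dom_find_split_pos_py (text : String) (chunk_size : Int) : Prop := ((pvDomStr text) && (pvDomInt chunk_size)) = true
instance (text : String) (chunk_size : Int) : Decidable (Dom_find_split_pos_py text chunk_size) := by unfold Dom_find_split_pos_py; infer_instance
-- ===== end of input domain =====

-- B replaces A's two staged scans (forward from the center with early return, then backward)
-- by ONE left-to-right pass carrying two accumulators (first forward candidate, last backward
-- candidate), deciding at the end (alternative decomposition, same results).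

-- ===== PORT A =====
def pvSplitChars : List Char := ['\n', '。', ';', '；', '!', '！', '?', '？']

-- _is_sentence_dot: prev/next are ""/1-char strings in Python, ported as Option Char (none = "")
def pvIsSentenceDot (cs : List Char) (i : Nat) : Bool :=
  if cs.getD i ' ' ≠ '.' then false
  else
    let prev : Option Char := if 0 < i then some (cs.getD (i - 1) ' ') else none
    let next : Option Char := if i + 1 < cs.length then some (cs.getD (i + 1) ' ') else none
    let prevAl : Bool := match prev with
      | some p => PySem.Chars.isdigit p || PySem.Chars.isalpha p
      | none => false
    let nextAl : Bool := match next with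
      | some q => PySem.Chars.isdigit q || PySem.Chars.isalpha q
      | none => false
    let nextCl : Bool := match next with
      | none => true
      | some q => decide (q ∈ ([' ', '\t', '\n', '"', '\'', '”', '’', ')', '】', '」', '》'] : List Char))
    if prevAl then false
    else if nextAl then false
    else if nextCl then true
    else false

-- the inner `while j < len(text) and text[j] in " \t\n": j += 1` loop
def pvSkipWs (cs : List Char) (j : Nat) : Nat :=
  if h : j < cs.length ∧ cs.getD j ' ' ∈ ([' ', '\t', '\n'] : List Char) then pvSkipWs cs (j + 1)
  else j
termination_by cs.length - j
decreasing_by exact Nat.sub_succ_lt_self _ _ h.1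

-- `for i in range(center, len(text)):` (len(text[:j]) = j since j ≤ len(text))
def pvFwd (cs : List Char) (chunk : Int) (i : Nat) : Option (Nat × Nat) :=
  if h : i < cs.length then
    if cs.getD i ' ' ∈ pvSplitChars then
      let j := pvSkipWs cs (i + 1)
      if j < cs.length ∧ (j : Int) ≤ chunk then some (i, j) else pvFwd cs chunk (i + 1)
    else if cs.getD i ' ' = '.' ∧ pvIsSentenceDot cs i = true then
      let j := pvSkipWs cs (i + 1)
      if j < cs.length ∧ (j : Int) ≤ chunk then some (i, j) else pvFwd cs chunk (i + 1)
    else pvFwd cs chunk (i + 1)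
  else none
termination_by cs.length - i
decreasing_by all_goals exact Nat.sub_succ_lt_self _ _ h

-- `for i in range(center, 0, -1):` — visits center, center-1, …, 1
def pvBwd (cs : List Char) (chunk : Int) : Nat → Option (Nat × Nat)
  | 0 => none
  | i + 1 =>
    if cs.getD (i + 1) ' ' ∈ pvSplitChars then
      let j := pvSkipWs cs (i + 2)
      if (j : Int) ≤ chunk then some (i + 1, j) else pvBwd cs chunk i
    else if cs.getD (i + 1) ' ' = '.' ∧ pvIsSentenceDot cs (i + 1) = true then
      let j := pvSkipWs cs (i + 2)
      if (j : Int) ≤ chunk then some (i + 1, j) else pvBwd cs chunk i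
    else pvBwd cs chunk i

def find_split_pos_py (text : String) (chunk_size : Int) : List Int :=
  let cs := text.toList
  let center := cs.length / 2
  match pvFwd cs chunk_size center with
  | some (i, j) => [(i : Int), (j : Int)]
  | none =>
    match pvBwd cs chunk_size center with
    | some (i, j) => [(i : Int), (j : Int)]
    | none => [min chunk_size (cs.length : Int), min chunk_size (cs.length : Int)]

-- ===== PORT B =====
def pvStops : List Char := ['\n', '。', ';', '；', '!', '！', '?', '？']
def pvClosers : List Char := [' ', '\t', '\n', '"', '\'', '”', '’', ')', '】', '」', '》']

-- Source B's inline boundary test: `c in stops` or the '.'-with-context check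
def pvIsBound (cs : List Char) (i : Nat) : Bool :=
  let c := cs.getD i ' '
  if c ∈ pvStops then true
  else if c ≠ '.' then false
  else
    let prev : Option Char := if 0 < i then some (cs.getD (i - 1) ' ') else none
    let next : Option Char := if i + 1 < cs.length then some (cs.getD (i + 1) ' ') else none
    (!(match prev with
        | some p => PySem.Chars.isdigit p || PySem.Chars.isalpha p
        | none => false)) &&
    (!(match next with
        | some q => PySem.Chars.isdigit q || PySem.Chars.isalpha q
        | none => false)) &&
    (match next with
      | none => true
      | some q => decide (q ∈ pvClosers))

-- Source B's inner whitespace-skipping while loop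
def pvAfter (cs : List Char) (j : Nat) : Nat :=
  if h : j < cs.length ∧ cs.getD j ' ' ∈ ([' ', '\t', '\n'] : List Char) then pvAfter cs (j + 1)
  else j
termination_by cs.length - j
decreasing_by exact Nat.sub_succ_lt_self _ _ h.1

-- one iteration of Source B's single pass: update (first_fwd, last_bwd) at index i
def pvStep (cs : List Char) (chunk : Int)
    (s : Option (Nat × Nat) × Option (Nat × Nat)) (i : Nat) :
    Option (Nat × Nat) × Option (Nat × Nat) :=
  if pvIsBound cs i then
    let j := pvAfter cs (i + 1)
    if (j : Int) ≤ chunk then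
      ((if cs.length / 2 ≤ i ∧ s.1 = none ∧ j < cs.length then some (i, j) else s.1),
       (if 1 ≤ i ∧ i ≤ cs.length / 2 then some (i, j) else s.2))
    else s
  else s

def find_split_pos_py_alt (text : String) (chunk_size : Int) : List Int :=
  let cs := text.toList
  let n := cs.length
  let r := (List.range n).foldl (pvStep cs chunk_size) (none, none)
  match r.1 with
  | some (i, j) => [(i : Int), (j : Int)]
  | none =>
    match r.2 with
    | some (i, j) => [(i : Int), (j : Int)]
    | none => [min chunk_size (n : Int), min chunk_size (n : Int)]

-- ===== PRECONDITION & SPEC =====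
def Spec_find_split_pos_py (text : String) (chunk_size : Int) (out : List Int) : Prop := out = find_split_pos_py_alt text chunk_size
instance (text : String) (chunk_size : Int) (out : List Int) : Decidable (Spec_find_split_pos_py text chunk_size out) := by unfold Spec_find_split_pos_py; infer_instance

-- ===== CLAIM =====
def Claim_equal_find_split_pos_py : Prop := ∀ (text : String) (chunk_size : Int), Dom_find_split_pos_py text chunk_size → Spec_find_split_pos_py text chunk_size (find_split_pos_py text chunk_size)

-- ===== LEMMAS AND PROOFS =====

theorem pvAfter_eq (cs : List Char) (j : Nat) : pvAfter cs j = pvSkipWs cs j := by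
  fun_induction pvAfter cs j with
  | case1 j h ih => rw [pvSkipWs, dif_pos h]; exact ih
  | case2 j h => rw [pvSkipWs, dif_neg h]

theorem pvIsBound_eq (cs : List Char) (i : Nat) :
    pvIsBound cs i =
      (decide (cs.getD i ' ' ∈ pvSplitChars) || (decide (cs.getD i ' ' = '.') && pvIsSentenceDot cs i)) := by
  simp only [pvIsBound, pvIsSentenceDot]
  split_ifs <;>
    simp_all [pvStops, pvSplitChars, pvClosers, Bool.and_assoc] <;>
    (try rcases ‹_ ∨ _› with h | h) <;> simp_all

-- the forward / backward per-index candidate, used to characterise both ports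
def pvStepF (cs : List Char) (chunk : Int) (k : Nat) : Option (Nat × Nat) :=
  if pvIsBound cs k then
    (let j := pvSkipWs cs (k + 1); if j < cs.length ∧ (j : Int) ≤ chunk then some (k, j) else none)
  else none

def pvStepB (cs : List Char) (chunk : Int) (k : Nat) : Option (Nat × Nat) :=
  if pvIsBound cs k then
    (let j := pvSkipWs cs (k + 1); if (j : Int) ≤ chunk then some (k, j) else none)
  else none

-- B-side per-index candidates (with the positional guards folded in)
def pvQF (cs : List Char) (chunk : Int) (i : Nat) : Option (Nat × Nat) :=
  if cs.length / 2 ≤ i then pvStepF cs chunk i else none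

def pvQB (cs : List Char) (chunk : Int) (i : Nat) : Option (Nat × Nat) :=
  if 1 ≤ i ∧ i ≤ cs.length / 2 then pvStepB cs chunk i else none

theorem pvIsBound_true_of_mem (cs : List Char) (i : Nat)
    (hmem : cs.getD i ' ' ∈ pvSplitChars) : pvIsBound cs i = true := by
  rw [pvIsBound_eq, decide_eq_true hmem, Bool.true_or]

theorem pvIsBound_true_of_dot (cs : List Char) (i : Nat)
    (hdot : cs.getD i ' ' = '.' ∧ pvIsSentenceDot cs i = true) : pvIsBound cs i = true := by
  rw [pvIsBound_eq, decide_eq_true hdot.1, Bool.true_and, hdot.2, Bool.or_true]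

theorem pvIsBound_false (cs : List Char) (i : Nat)
    (hmem : cs.getD i ' ' ∉ pvSplitChars)
    (hdot : ¬(cs.getD i ' ' = '.' ∧ pvIsSentenceDot cs i = true)) : pvIsBound cs i = false := by
  have h1 : decide (cs.getD i ' ' ∈ pvSplitChars) = false := decide_eq_false hmem
  by_cases hd : cs.getD i ' ' = '.'
  · have h2 : pvIsSentenceDot cs i = false := by
      cases hs : pvIsSentenceDot cs i
      · rfl
      · exact absurd ⟨hd, hs⟩ hdot
    rw [pvIsBound_eq, h1, h2, Bool.and_false, Bool.false_or]
  · have h2 : decide (cs.getD i ' ' = '.') = false := decide_eq_false hd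
    rw [pvIsBound_eq, h1, h2, Bool.false_and, Bool.false_or]

-- ---- characterisation of A's two scans ----
theorem pvFwd_eq (cs : List Char) (chunk : Int) (i : Nat) :
    pvFwd cs chunk i = (List.range' i (cs.length - i)).findSome? (pvStepF cs chunk) := by
  fun_induction pvFwd cs chunk i with
  | case1 i h hmem j hcond =>
    rw [show cs.length - i = (cs.length - (i + 1)) + 1 by omega, List.range'_succ,
      List.findSome?_cons]
    have hstep : pvStepF cs chunk i = some (i, pvSkipWs cs (i + 1)) := by
      unfold pvStepF
      rw [pvIsBound_true_of_mem cs i hmem]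
      exact if_pos hcond
    rw [hstep]
  | case2 i h hmem j hcond ih =>
    rw [show cs.length - i = (cs.length - (i + 1)) + 1 by omega, List.range'_succ,
      List.findSome?_cons]
    have hstep : pvStepF cs chunk i = none := by
      unfold pvStepF
      rw [pvIsBound_true_of_mem cs i hmem]
      exact if_neg hcond
    rw [hstep]
    exact ih
  | case3 i h hmem hdot j hcond =>
    rw [show cs.length - i = (cs.length - (i + 1)) + 1 by omega, List.range'_succ,
      List.findSome?_cons]
    have hstep : pvStepF cs chunk i = some (i, pvSkipWs cs (i + 1)) := by
      unfold pvStepF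
      rw [pvIsBound_true_of_dot cs i hdot]
      exact if_pos hcond
    rw [hstep]
  | case4 i h hmem hdot j hcond ih =>
    rw [show cs.length - i = (cs.length - (i + 1)) + 1 by omega, List.range'_succ,
      List.findSome?_cons]
    have hstep : pvStepF cs chunk i = none := by
      unfold pvStepF
      rw [pvIsBound_true_of_dot cs i hdot]
      exact if_neg hcond
    rw [hstep]
    exact ih
  | case5 i h hmem hdot ih =>
    rw [show cs.length - i = (cs.length - (i + 1)) + 1 by omega, List.range'_succ,
      List.findSome?_cons]
    have hstep : pvStepF cs chunk i = none := by
      unfold pvStepF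
      rw [pvIsBound_false cs i hmem hdot]
      exact if_neg (by simp)
    rw [hstep]
    exact ih
  | case6 i h =>
    rw [show cs.length - i = 0 by omega]
    rfl

theorem pvBwd_eq (cs : List Char) (chunk : Int) (i : Nat) :
    pvBwd cs chunk i = (List.range' 1 i).reverse.findSome? (pvStepB cs chunk) := by
  induction i with
  | zero => rfl
  | succ i ih =>
    rw [List.range'_concat, List.reverse_append]
    simp only [List.reverse_singleton, List.singleton_append, List.findSome?_cons,
      show 1 + 1 * i = i + 1 by omega]
    by_cases hmem : cs.getD (i + 1) ' ' ∈ pvSplitChars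
    · have hb := pvIsBound_true_of_mem cs (i + 1) hmem
      by_cases hcond : ((pvSkipWs cs (i + 1 + 1) : Int) ≤ chunk)
      · have hstep : pvStepB cs chunk (i + 1) = some (i + 1, pvSkipWs cs (i + 1 + 1)) := by
          unfold pvStepB
          rw [hb]
          exact if_pos hcond
        rw [hstep]
        show pvBwd cs chunk (i + 1) = some (i + 1, pvSkipWs cs (i + 1 + 1))
        simp only [pvBwd, if_pos hmem]
        exact if_pos hcond
      · have hstep : pvStepB cs chunk (i + 1) = none := by
          unfold pvStepB
          rw [hb]
          exact if_neg hcond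
        have hL : pvBwd cs chunk (i + 1) = pvBwd cs chunk i := by
          simp only [pvBwd, if_pos hmem]
          exact if_neg hcond
        rw [hstep, hL]
        exact ih
    · by_cases hdot : cs.getD (i + 1) ' ' = '.' ∧ pvIsSentenceDot cs (i + 1) = true
      · have hb := pvIsBound_true_of_dot cs (i + 1) hdot
        by_cases hcond : ((pvSkipWs cs (i + 1 + 1) : Int) ≤ chunk)
        · have hstep : pvStepB cs chunk (i + 1) = some (i + 1, pvSkipWs cs (i + 1 + 1)) := by
            unfold pvStepB
            rw [hb]
            exact if_pos hcond
          rw [hstep]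
          show pvBwd cs chunk (i + 1) = some (i + 1, pvSkipWs cs (i + 1 + 1))
          simp only [pvBwd, if_neg hmem, if_pos hdot]
          exact if_pos hcond
        · have hstep : pvStepB cs chunk (i + 1) = none := by
            unfold pvStepB
            rw [hb]
            exact if_neg hcond
          have hL : pvBwd cs chunk (i + 1) = pvBwd cs chunk i := by
            simp only [pvBwd, if_neg hmem, if_pos hdot]
            exact if_neg hcond
          rw [hstep, hL]
          exact ih
      · have hb := pvIsBound_false cs (i + 1) hmem hdot
        have hstep : pvStepB cs chunk (i + 1) = none := by
          unfold pvStepB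
          rw [hb]
          exact if_neg (by simp)
        have hL : pvBwd cs chunk (i + 1) = pvBwd cs chunk i := by
          simp only [pvBwd, if_neg hmem, if_neg hdot]
        rw [hstep, hL]
        exact ih

theorem pvFindSome?_congr {α β : Type} (f g : α → Option β) (l : List α)
    (h : ∀ x ∈ l, f x = g x) : l.findSome? f = l.findSome? g := by
  induction l with
  | nil => rfl
  | cons a l ih =>
    simp only [List.findSome?_cons, h a (by simp)]
    cases g a with
    | none => exact ih fun x hx => h x (by simp [hx])
    | some b => rfl

-- ---- characterisation of B's single pass ----
theorem pvFold_spec (cs : List Char) (chunk : Int) (l : List Nat)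
    (f0 b0 : Option (Nat × Nat)) :
    l.foldl (pvStep cs chunk) (f0, b0) =
      (f0.or (l.findSome? (pvQF cs chunk)), (l.reverse.findSome? (pvQB cs chunk)).or b0) := by
  induction l generalizing f0 b0 with
  | nil => simp
  | cons a l ih =>
    have hstep : pvStep cs chunk (f0, b0) a =
        (f0.or (pvQF cs chunk a), (pvQB cs chunk a).or b0) := by
      unfold pvStep pvQF pvQB pvStepF pvStepB
      cases f0 <;>
        by_cases hb : pvIsBound cs a <;>
        by_cases hj : ((pvAfter cs (a + 1) : Int) ≤ chunk) <;>
        simp [hb, pvAfter_eq] <;>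
        split_ifs <;> simp_all
    rw [List.foldl_cons, hstep, ih, Prod.mk.injEq]
    constructor
    · cases f0
      · simp only [List.findSome?_cons, Option.none_or]
        cases pvQF cs chunk a <;> simp
      · simp [List.findSome?_cons]
    · simp only [List.reverse_cons, List.findSome?_append]
      cases h : (l.reverse.findSome? (pvQB cs chunk))
      · simp only [Option.none_or, List.findSome?_cons]
        cases pvQB cs chunk a <;> simp
      · simp

theorem pvRange_findSome_QF (cs : List Char) (chunk : Int) :
    (List.range cs.length).findSome? (pvQF cs chunk) = pvFwd cs chunk (cs.length / 2) := by
  rw [pvFwd_eq]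
  have hc : cs.length / 2 ≤ cs.length := Nat.div_le_self _ 2
  have hsplit : List.range cs.length =
      List.range' 0 (cs.length / 2) ++ List.range' (cs.length / 2) (cs.length - cs.length / 2) := by
    rw [List.range_eq_range']
    have h := List.range'_append (s := 0) (m := cs.length / 2)
      (n := cs.length - cs.length / 2) (step := 1)
    rw [show (0 : Nat) + 1 * (cs.length / 2) = cs.length / 2 by omega,
      show cs.length / 2 + (cs.length - cs.length / 2) = cs.length by omega] at h
    exact h.symm
  rw [hsplit, List.findSome?_append]
  have h1 : (List.range' 0 (cs.length / 2)).findSome? (pvQF cs chunk) = none := by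
    rw [List.findSome?_eq_none_iff]
    intro x hx
    obtain ⟨k, hk, rfl⟩ := List.mem_range'.mp hx
    unfold pvQF
    rw [if_neg (by omega)]
  rw [h1, Option.none_or]
  apply pvFindSome?_congr
  intro x hx
  obtain ⟨k, hk, rfl⟩ := List.mem_range'.mp hx
  unfold pvQF
  rw [if_pos (by omega)]

theorem pvRange_findSome_QB (cs : List Char) (chunk : Int) :
    (List.range cs.length).reverse.findSome? (pvQB cs chunk) = pvBwd cs chunk (cs.length / 2) := by
  rw [pvBwd_eq]
  by_cases hn0 : cs.length = 0
  · rw [hn0]; rfl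
  · have hc1 : cs.length / 2 + 1 ≤ cs.length := by
      have := Nat.div_le_self cs.length 2
      omega
    have hsplit : List.range cs.length =
        [0] ++ List.range' 1 (cs.length / 2) ++
          List.range' (cs.length / 2 + 1) (cs.length - (cs.length / 2 + 1)) := by
      rw [List.range_eq_range']
      have h1 := List.range'_append (s := 0) (m := 1)
        (n := cs.length / 2) (step := 1)
      have h2 := List.range'_append (s := 0) (m := 1 + cs.length / 2)
        (n := cs.length - (cs.length / 2 + 1)) (step := 1)
      rw [show (0 : Nat) + 1 * 1 = 1 by omega] at h1
      rw [show (0 : Nat) + 1 * (1 + cs.length / 2) = cs.length / 2 + 1 by omega,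
        show 1 + cs.length / 2 + (cs.length - (cs.length / 2 + 1)) = cs.length by omega] at h2
      rw [← h2, ← h1]
      rfl
    rw [hsplit, List.reverse_append, List.reverse_append, List.findSome?_append,
      List.findSome?_append]
    have hup : (List.range' (cs.length / 2 + 1) (cs.length - (cs.length / 2 + 1))).reverse.findSome?
        (pvQB cs chunk) = none := by
      rw [List.findSome?_eq_none_iff]
      intro x hx
      rw [List.mem_reverse] at hx
      obtain ⟨k, hk, rfl⟩ := List.mem_range'.mp hx
      unfold pvQB
      rw [if_neg (by omega)]
    have hz : (([0] : List Nat)).reverse.findSome? (pvQB cs chunk) = none := by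
      unfold pvQB
      simp
    rw [hup, hz, Option.none_or, Option.or_none]
    apply pvFindSome?_congr
    intro x hx
    rw [List.mem_reverse] at hx
    obtain ⟨k, hk, rfl⟩ := List.mem_range'.mp hx
    unfold pvQB
    rw [if_pos (by omega)]

theorem pvMain (text : String) (chunk_size : Int) :
    find_split_pos_py text chunk_size = find_split_pos_py_alt text chunk_size := by
  simp only [find_split_pos_py, find_split_pos_py_alt]
  generalize text.toList = cs
  rw [pvFold_spec cs chunk_size (List.range cs.length) none none]
  simp only [Option.none_or, Option.or_none, pvRange_findSome_QF, pvRange_findSome_QB]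

-- ===== VERDICT =====
theorem find_split_pos_py_spec : Claim_equal_find_split_pos_py := by
  intro text chunk_size _
  unfold Spec_find_split_pos_py
  exact pvMain text chunk_size
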